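-- pv_equiv track=rewrite | github.com/SHX-Developer/MINECRAFT | src/minecraft_ursina/world/terrain.py | _tree_placements
-- ===== SOURCE A (Python) =====
-- from typing import Dict, Tuple
--
-- GridPos = Tuple[int, int, int]
--
-- TREE_TRUNK_HEIGHT = 4
--
-- def _tree_placements(x: int, ground_y: int, z: int) -> list[tuple[GridPos, str]]:
--     trunk_top_y = ground_y + TREE_TRUNK_HEIGHT
--     placements: list[tuple[GridPos, str]] = [
--         ((x, ground_y + dy, z), "wood")
--         for dy in range(1, TREE_TRUNK_HEIGHT + 1)
--     ]
--
--     leaves: set[GridPos] = set()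
--     for ox in range(-2, 3):
--         for oz in range(-2, 3):
--             if abs(ox) == 2 and abs(oz) == 2:
--                 continue
--             leaves.add((x + ox, trunk_top_y, z + oz))
--
--     for ox in range(-1, 2):
--         for oz in range(-1, 2):
--             leaves.add((x + ox, trunk_top_y + 1, z + oz))
--
--     leaves.add((x, trunk_top_y + 2, z))
--
--     trunk_positions = {position for position, _ in placements}
--     for position in sorted(leaves):
--         if position in trunk_positions:
--             continue
--         placements.append((position, "leaves"))
--
--     return placements
-- ===== SOURCE B (Python) =====
-- from typing import Tuple
--
-- GridPos = Tuple[int, int, int]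
--
-- TREE_TRUNK_HEIGHT = 4
--
--
-- def _tree_placements(x: int, ground_y: int, z: int) -> list:
--     # Wood trunk, then leaves emitted directly in lexicographic (x, y, z) order
--     # (no set, no sort): for each ox ascending, the three leaf layers in
--     # ascending y, each scanned with oz ascending; the trunk-top block is the
--     # only leaf position overlapping the trunk and is skipped in place.
--     t = ground_y + TREE_TRUNK_HEIGHT
--     out = [((x, ground_y + dy, z), "wood") for dy in range(1, TREE_TRUNK_HEIGHT + 1)]
--     for ox in range(-2, 3):
--         for oz in range(-2, 3):
--             if abs(ox) == 2 and abs(oz) == 2: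
--                 continue
--             if ox == 0 and oz == 0:
--                 continue  # (x, t, z) is the trunk-top wood block
--             out.append(((x + ox, t, z + oz), "leaves"))
--         if -1 <= ox <= 1:
--             for oz in range(-1, 2):
--                 out.append(((x + ox, t + 1, z + oz), "leaves"))
--         if ox == 0:
--             out.append(((x, t + 2, z), "leaves"))
--     return out
-- ===== Notes on version B (the rewrite author's own statement) =====
-- stated objective: simpler
-- what changed: B drops the leaf set and the sort entirely: it emits leaves directly in lexicographic (x,y,z) order by interleaving the three leaf layers per x-offset and skipping the one trunk-overlapping block in place, instead of accumulating a set, sorting it and filtering against a trunk-position set.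
import Mathlib
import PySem

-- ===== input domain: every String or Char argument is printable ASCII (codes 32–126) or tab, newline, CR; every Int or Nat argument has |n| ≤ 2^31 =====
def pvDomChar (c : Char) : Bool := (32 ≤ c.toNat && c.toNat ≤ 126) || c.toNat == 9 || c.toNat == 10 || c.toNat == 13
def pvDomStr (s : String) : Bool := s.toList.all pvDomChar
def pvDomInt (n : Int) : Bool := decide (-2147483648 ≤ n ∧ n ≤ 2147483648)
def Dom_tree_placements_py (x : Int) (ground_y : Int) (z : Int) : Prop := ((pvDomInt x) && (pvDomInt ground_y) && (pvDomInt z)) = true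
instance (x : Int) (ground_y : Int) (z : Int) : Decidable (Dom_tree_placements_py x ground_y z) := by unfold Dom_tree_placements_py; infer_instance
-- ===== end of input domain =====

-- B emits the leaves directly in lexicographic (x,y,z) order, layer-interleaved, with the
-- trunk-top block skipped in place — no set and no sort (objective: simpler).

def pvTRUNK_H : Int := 4   -- TREE_TRUNK_HEIGHT

-- ===== PORT A =====
def tree_placements_py (x : Int) (ground_y : Int) (z : Int) : List ((Int × Int × Int) × String) :=
  let trunk_top_y := ground_y + pvTRUNK_H
  let placements : List ((Int × Int × Int) × String) :=
    (PySem.List.pyRange 1 (pvTRUNK_H + 1) 1).map (fun dy => ((x, ground_y + dy, z), "wood"))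
  let leaves : PySem.Set (Int × Int × Int) :=
    (PySem.List.pyRange (-2) 3 1).foldl (fun leaves ox =>
      (PySem.List.pyRange (-2) 3 1).foldl (fun leaves oz =>
        if |ox| = 2 ∧ |oz| = 2 then leaves
        else PySem.Set.add leaves (x + ox, trunk_top_y, z + oz)) leaves) PySem.Set.empty
  let leaves := (PySem.List.pyRange (-1) 2 1).foldl (fun leaves ox =>
      (PySem.List.pyRange (-1) 2 1).foldl (fun leaves oz =>
        PySem.Set.add leaves (x + ox, trunk_top_y + 1, z + oz)) leaves) leaves
  let leaves := PySem.Set.add leaves (x, trunk_top_y + 2, z)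
  let trunk_positions : PySem.Set (Int × Int × Int) :=
    placements.foldl (fun s pr => PySem.Set.add s pr.1) PySem.Set.empty
  -- sorted(leaves): Python compares int triples lexicographically; ported exactly as three
  -- successive STABLE sorts, least-significant key first (z, then y, then x)
  let sortedLeaves := PySem.List.sorted (PySem.List.sorted (PySem.List.sorted leaves (fun p => p.2.2)) (fun p => p.2.1)) (fun p => p.1)
  sortedLeaves.foldl (fun placements position =>
    if PySem.Set.contains trunk_positions position then placements
    else placements ++ [(position, "leaves")]) placements

-- ===== PORT B =====
def tree_placements_py_alt (x : Int) (ground_y : Int) (z : Int) : List ((Int × Int × Int) × String) :=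
  let t := ground_y + pvTRUNK_H
  let out : List ((Int × Int × Int) × String) :=
    (PySem.List.pyRange 1 (pvTRUNK_H + 1) 1).map (fun dy => ((x, ground_y + dy, z), "wood"))
  (PySem.List.pyRange (-2) 3 1).foldl (fun out ox =>
    let out := (PySem.List.pyRange (-2) 3 1).foldl (fun out oz =>
      if |ox| = 2 ∧ |oz| = 2 then out
      else if ox = 0 ∧ oz = 0 then out
      else out ++ [((x + ox, t, z + oz), "leaves")]) out
    let out := if -1 ≤ ox ∧ ox ≤ 1 then
        (PySem.List.pyRange (-1) 2 1).foldl (fun out oz =>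
          out ++ [((x + ox, t + 1, z + oz), "leaves")]) out
      else out
    if ox = 0 then out ++ [((x, t + 2, z), "leaves")] else out) out

-- ===== PRECONDITION & SPEC =====
def Spec_tree_placements_py (x : Int) (ground_y : Int) (z : Int) (out : List ((Int × Int × Int) × String)) : Prop := out = tree_placements_py_alt x ground_y z
instance (x : Int) (ground_y : Int) (z : Int) (out : List ((Int × Int × Int) × String)) : Decidable (Spec_tree_placements_py x ground_y z out) := by unfold Spec_tree_placements_py; infer_instance

-- ===== CLAIM (what is proved, stated in full; the proofs are below) =====
def Claim_equal_tree_placements_py : Prop := ∀ (x : Int) (ground_y : Int) (z : Int), Dom_tree_placements_py x ground_y z → Spec_tree_placements_py x ground_y z (tree_placements_py x ground_y z)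

-- ===== LEMMAS AND PROOFS =====

-- translation of a grid position by the tree's base coordinates
def pvSh (x g z : Int) (p : Int × Int × Int) : Int × Int × Int := (x + p.1, g + p.2.1, z + p.2.2)
def pvShP (x g z : Int) (pr : (Int × Int × Int) × String) : (Int × Int × Int) × String :=
  (pvSh x g z pr.1, pr.2)

theorem pvSh_inj (x g z : Int) : Function.Injective (pvSh x g z) := by
  intro p q h
  simp only [pvSh, Prod.mk.injEq, add_right_inj] at h
  obtain ⟨h1, h2, h3⟩ := h
  exact Prod.ext h1 (Prod.ext h2 h3)

theorem pv_contains_sh (x g z : Int) (s : List (Int × Int × Int)) (p : Int × Int × Int) :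
    PySem.Set.contains (s.map (pvSh x g z)) (pvSh x g z p) = PySem.Set.contains s p := by
  simp [PySem.Set.contains, List.mem_map_of_injective (pvSh_inj x g z)]

theorem pv_add_sh (x g z : Int) (s : List (Int × Int × Int)) (p : Int × Int × Int) :
    PySem.Set.add (s.map (pvSh x g z)) (pvSh x g z p) = (PySem.Set.add s p).map (pvSh x g z) := by
  simp only [PySem.Set.add, pv_contains_sh]
  split <;> simp

theorem pv_insertBy_transport {α β : Type} (f : α → β) (b1 : β → β → Bool) (b2 : α → α → Bool)
    (h : ∀ a a', b1 (f a) (f a') = b2 a a') (p : α) (s : List α) :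
    PySem.List.insertBy b1 (f p) (s.map f) = (PySem.List.insertBy b2 p s).map f := by
  induction s with
  | nil => simp [PySem.List.insertBy]
  | cons a t ih => simp only [List.map, PySem.List.insertBy, h]; split <;> simp [ih]

theorem pv_sorted_transport {α β : Type} (f : α → β) (k1 : β → Int) (k2 : α → Int)
    (h : ∀ a a', k1 (f a) < k1 (f a') ↔ k2 a < k2 a') (s : List α) :
    PySem.List.sorted (s.map f) k1 false = (PySem.List.sorted s k2 false).map f := by
  rw [PySem.List.sorted_eq_foldl_insertBy, PySem.List.sorted_eq_foldl_insertBy, List.foldl_map]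
  exact List.foldl_hom (List.map f) (l := s) (init := ([] : List α))
    (g₁ := fun acc a => PySem.List.insertBy (fun a b => decide (k2 a < k2 b)) a acc)
    (g₂ := fun acc a => PySem.List.insertBy (fun a b => decide (k1 a < k1 b)) (f a) acc)
    (fun acc a => pv_insertBy_transport f _ _
      (fun a a' => decide_eq_decide.mpr (h a a')) a acc)

-- concrete offset data (proof helpers)
def pvWOODS : List ((Int × Int × Int) × String) :=
  [((0,1,0), "wood"), ((0,2,0), "wood"), ((0,3,0), "wood"), ((0,4,0), "wood")]

def pvOUT : List ((Int × Int × Int) × String) :=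
  [((0,1,0), "wood"), ((0,2,0), "wood"), ((0,3,0), "wood"), ((0,4,0), "wood"),
   ((-2,4,-1), "leaves"), ((-2,4,0), "leaves"), ((-2,4,1), "leaves"),
   ((-1,4,-2), "leaves"), ((-1,4,-1), "leaves"), ((-1,4,0), "leaves"), ((-1,4,1), "leaves"), ((-1,4,2), "leaves"),
   ((-1,5,-1), "leaves"), ((-1,5,0), "leaves"), ((-1,5,1), "leaves"),
   ((0,4,-2), "leaves"), ((0,4,-1), "leaves"), ((0,4,1), "leaves"), ((0,4,2), "leaves"),
   ((0,5,-1), "leaves"), ((0,5,0), "leaves"), ((0,5,1), "leaves"), ((0,6,0), "leaves"),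
   ((1,4,-2), "leaves"), ((1,4,-1), "leaves"), ((1,4,0), "leaves"), ((1,4,1), "leaves"), ((1,4,2), "leaves"),
   ((1,5,-1), "leaves"), ((1,5,0), "leaves"), ((1,5,1), "leaves"),
   ((2,4,-1), "leaves"), ((2,4,0), "leaves"), ((2,4,1), "leaves")]

-- A's computation carried out on trunk-relative offsets
def pvL1OFF : PySem.Set (Int × Int × Int) :=
  ([-2,-1,0,1,2] : List Int).foldl (fun leaves ox =>
    ([-2,-1,0,1,2] : List Int).foldl (fun leaves oz =>
      if |ox| = 2 ∧ |oz| = 2 then leaves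
      else PySem.Set.add leaves (ox, 4, oz)) leaves) PySem.Set.empty

def pvL3OFF : PySem.Set (Int × Int × Int) :=
  PySem.Set.add
    (([-1,0,1] : List Int).foldl (fun leaves ox =>
      ([-1,0,1] : List Int).foldl (fun leaves oz =>
        PySem.Set.add leaves (ox, 5, oz)) leaves) pvL1OFF)
    (0, 6, 0)

def pvTRUNKOFF : PySem.Set (Int × Int × Int) :=
  pvWOODS.foldl (fun s pr => PySem.Set.add s pr.1) PySem.Set.empty

def pvAOFF : List ((Int × Int × Int) × String) :=
  (PySem.List.sorted (PySem.List.sorted (PySem.List.sorted pvL3OFF (fun p => p.2.2))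
      (fun p => p.2.1)) (fun p => p.1)).foldl (fun plc p =>
    if PySem.Set.contains pvTRUNKOFF p then plc else plc ++ [(p, "leaves")]) pvWOODS

-- B's computation carried out on trunk-relative offsets
def pvBOFF : List ((Int × Int × Int) × String) :=
  ([-2,-1,0,1,2] : List Int).foldl (fun out ox =>
    let out := ([-2,-1,0,1,2] : List Int).foldl (fun out oz =>
      if |ox| = 2 ∧ |oz| = 2 then out
      else if ox = 0 ∧ oz = 0 then out
      else out ++ [((ox, 4, oz), "leaves")]) out
    let out := if -1 ≤ ox ∧ ox ≤ 1 then
        ([-1,0,1] : List Int).foldl (fun out oz => out ++ [((ox, 5, oz), "leaves")]) out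
      else out
    if ox = 0 then out ++ [((0, 6, 0), "leaves")] else out) pvWOODS

theorem pvAOFF_eq_pvOUT : pvAOFF = pvOUT := by decide

theorem pvBOFF_eq_pvOUT : pvBOFF = pvOUT := by decide

theorem pvW_eq (x g z : Int) :
    List.map (fun dy => (((x : Int), g + dy, z), "wood")) ([1,2,3,4] : List Int) =
      pvWOODS.map (pvShP x g z) := by
  simp [pvWOODS, pvShP, pvSh]

set_option maxHeartbeats 1000000 in
theorem pvA_eq (x g z : Int) :
    tree_placements_py x g z = pvAOFF.map (pvShP x g z) := by
  have h1 : PySem.List.pyRange (-2) 3 1 = ([-2,-1,0,1,2] : List Int) := by decide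
  have h2 : PySem.List.pyRange (-1) 2 1 = ([-1,0,1] : List Int) := by decide
  have h3 : PySem.List.pyRange 1 (pvTRUNK_H + 1) 1 = ([1,2,3,4] : List Int) := by decide
  have e0 : g + pvTRUNK_H = g + 4 := rfl
  have e1 : g + 4 + 1 = g + 5 := by omega
  have e2 : g + 4 + 2 = g + 6 := by omega
  simp only [tree_placements_py, h1, h2, h3]
  simp only [e0, e1, e2]
  rw [pvW_eq x g z]
  have hL1 : List.foldl (fun leaves ox => List.foldl (fun leaves oz =>
        if |ox| = 2 ∧ |oz| = 2 then leaves
        else PySem.Set.add leaves (x + ox, g + 4, z + oz)) leaves ([-2,-1,0,1,2] : List Int))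
        PySem.Set.empty ([-2,-1,0,1,2] : List Int) = pvL1OFF.map (pvSh x g z) := by
    rw [pvL1OFF]
    refine List.foldl_hom (List.map (pvSh x g z))
      (g₁ := fun leaves ox => List.foldl (fun leaves oz =>
        if |ox| = 2 ∧ |oz| = 2 then leaves
        else PySem.Set.add leaves (ox, 4, oz)) leaves ([-2,-1,0,1,2] : List Int))
      (g₂ := fun leaves ox => List.foldl (fun leaves oz =>
        if |ox| = 2 ∧ |oz| = 2 then leaves
        else PySem.Set.add leaves (x + ox, g + 4, z + oz)) leaves ([-2,-1,0,1,2] : List Int))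
      (init := PySem.Set.empty) (l := ([-2,-1,0,1,2] : List Int)) ?_
    intro acc ox
    refine List.foldl_hom (List.map (pvSh x g z))
      (g₁ := fun leaves oz => if |ox| = 2 ∧ |oz| = 2 then leaves
        else PySem.Set.add leaves (ox, 4, oz))
      (g₂ := fun leaves oz => if |ox| = 2 ∧ |oz| = 2 then leaves
        else PySem.Set.add leaves (x + ox, g + 4, z + oz))
      (init := acc) (l := ([-2,-1,0,1,2] : List Int)) ?_
    intro a oz
    by_cases hc : |ox| = 2 ∧ |oz| = 2
    · simp only [if_pos hc]
    · simp only [if_neg hc]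
      exact pv_add_sh x g z a (ox, 4, oz)
  rw [hL1]
  have hL2 : List.foldl (fun leaves ox => List.foldl (fun leaves oz =>
        PySem.Set.add leaves (x + ox, g + 5, z + oz)) leaves ([-1,0,1] : List Int))
        (pvL1OFF.map (pvSh x g z)) ([-1,0,1] : List Int) =
        (List.foldl (fun leaves ox => List.foldl (fun leaves oz =>
          PySem.Set.add leaves (ox, 5, oz)) leaves ([-1,0,1] : List Int))
          pvL1OFF ([-1,0,1] : List Int)).map (pvSh x g z) := by
    refine List.foldl_hom (List.map (pvSh x g z))
      (g₁ := fun leaves ox => List.foldl (fun leaves oz =>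
        PySem.Set.add leaves (ox, 5, oz)) leaves ([-1,0,1] : List Int))
      (g₂ := fun leaves ox => List.foldl (fun leaves oz =>
        PySem.Set.add leaves (x + ox, g + 5, z + oz)) leaves ([-1,0,1] : List Int))
      (init := pvL1OFF) (l := ([-1,0,1] : List Int)) ?_
    intro acc ox
    refine List.foldl_hom (List.map (pvSh x g z))
      (g₁ := fun leaves oz => PySem.Set.add leaves (ox, 5, oz))
      (g₂ := fun leaves oz => PySem.Set.add leaves (x + ox, g + 5, z + oz))
      (init := acc) (l := ([-1,0,1] : List Int)) ?_
    intro a oz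
    exact pv_add_sh x g z a (ox, 5, oz)
  rw [hL2]
  rw [show ((x : Int), g + 6, z) = pvSh x g z (0, 6, 0) from by simp [pvSh]]
  rw [pv_add_sh]
  have hT : List.foldl (fun s pr => PySem.Set.add s pr.1) PySem.Set.empty
      (pvWOODS.map (pvShP x g z)) = pvTRUNKOFF.map (pvSh x g z) := by
    rw [List.foldl_map, pvTRUNKOFF]
    refine List.foldl_hom (List.map (pvSh x g z))
      (g₁ := fun s pr => PySem.Set.add s pr.1)
      (g₂ := fun s pr => PySem.Set.add s (pvSh x g z pr.1))
      (init := PySem.Set.empty) (l := pvWOODS) ?_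
    intro s pr
    exact pv_add_sh x g z s pr.1
  rw [hT]
  rw [pv_sorted_transport (pvSh x g z) (fun p => p.2.2) (fun p => p.2.2)
    (fun a a' => by simp [pvSh])]
  rw [pv_sorted_transport (pvSh x g z) (fun p => p.2.1) (fun p => p.2.1)
    (fun a a' => by simp [pvSh])]
  rw [pv_sorted_transport (pvSh x g z) (fun p => p.1) (fun p => p.1)
    (fun a a' => by simp [pvSh])]
  rw [List.foldl_map]
  simp only [pv_contains_sh]
  rw [pvAOFF]
  refine List.foldl_hom (List.map (pvShP x g z))
    (g₁ := fun plc p => if PySem.Set.contains pvTRUNKOFF p then plc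
      else plc ++ [(p, "leaves")])
    (g₂ := fun plc p => if PySem.Set.contains pvTRUNKOFF p then plc
      else plc ++ [(pvSh x g z p, "leaves")])
    (init := pvWOODS)
    (l := PySem.List.sorted (PySem.List.sorted (PySem.List.sorted pvL3OFF (fun p => p.2.2))
      (fun p => p.2.1)) (fun p => p.1)) ?_
  intro acc p
  by_cases hc : PySem.Set.contains pvTRUNKOFF p = true
  · simp only [if_pos hc]
  · simp only [if_neg hc]
    simp [pvShP]

set_option maxHeartbeats 1000000 in
theorem pvB_eq (x g z : Int) :
    tree_placements_py_alt x g z = pvBOFF.map (pvShP x g z) := by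
  have h1 : PySem.List.pyRange (-2) 3 1 = ([-2,-1,0,1,2] : List Int) := by decide
  have h2 : PySem.List.pyRange (-1) 2 1 = ([-1,0,1] : List Int) := by decide
  have h3 : PySem.List.pyRange 1 (pvTRUNK_H + 1) 1 = ([1,2,3,4] : List Int) := by decide
  have e0 : g + pvTRUNK_H = g + 4 := rfl
  have e1 : g + 4 + 1 = g + 5 := by omega
  have e2 : g + 4 + 2 = g + 6 := by omega
  simp only [tree_placements_py_alt, h1, h2, h3]
  simp only [e0, e1, e2]
  rw [pvW_eq x g z]
  rw [pvBOFF]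
  refine List.foldl_hom (List.map (pvShP x g z))
    (g₁ := fun out ox =>
      if ox = 0 then
        (if -1 ≤ ox ∧ ox ≤ 1 then
          ([-1,0,1] : List Int).foldl (fun out oz => out ++ [((ox, 5, oz), "leaves")])
            (([-2,-1,0,1,2] : List Int).foldl (fun out oz =>
              if |ox| = 2 ∧ |oz| = 2 then out
              else if ox = 0 ∧ oz = 0 then out
              else out ++ [((ox, 4, oz), "leaves")]) out)
        else ([-2,-1,0,1,2] : List Int).foldl (fun out oz =>
              if |ox| = 2 ∧ |oz| = 2 then out
              else if ox = 0 ∧ oz = 0 then out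
              else out ++ [((ox, 4, oz), "leaves")]) out) ++ [((0, 6, 0), "leaves")]
      else
        (if -1 ≤ ox ∧ ox ≤ 1 then
          ([-1,0,1] : List Int).foldl (fun out oz => out ++ [((ox, 5, oz), "leaves")])
            (([-2,-1,0,1,2] : List Int).foldl (fun out oz =>
              if |ox| = 2 ∧ |oz| = 2 then out
              else if ox = 0 ∧ oz = 0 then out
              else out ++ [((ox, 4, oz), "leaves")]) out)
        else ([-2,-1,0,1,2] : List Int).foldl (fun out oz =>
              if |ox| = 2 ∧ |oz| = 2 then out
              else if ox = 0 ∧ oz = 0 then out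
              else out ++ [((ox, 4, oz), "leaves")]) out))
    (g₂ := fun out ox =>
      if ox = 0 then
        (if -1 ≤ ox ∧ ox ≤ 1 then
          ([-1,0,1] : List Int).foldl (fun out oz => out ++ [((x + ox, g + 5, z + oz), "leaves")])
            (([-2,-1,0,1,2] : List Int).foldl (fun out oz =>
              if |ox| = 2 ∧ |oz| = 2 then out
              else if ox = 0 ∧ oz = 0 then out
              else out ++ [((x + ox, g + 4, z + oz), "leaves")]) out)
        else ([-2,-1,0,1,2] : List Int).foldl (fun out oz =>
              if |ox| = 2 ∧ |oz| = 2 then out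
              else if ox = 0 ∧ oz = 0 then out
              else out ++ [((x + ox, g + 4, z + oz), "leaves")]) out) ++ [((x, g + 6, z), "leaves")]
      else
        (if -1 ≤ ox ∧ ox ≤ 1 then
          ([-1,0,1] : List Int).foldl (fun out oz => out ++ [((x + ox, g + 5, z + oz), "leaves")])
            (([-2,-1,0,1,2] : List Int).foldl (fun out oz =>
              if |ox| = 2 ∧ |oz| = 2 then out
              else if ox = 0 ∧ oz = 0 then out
              else out ++ [((x + ox, g + 4, z + oz), "leaves")]) out)
        else ([-2,-1,0,1,2] : List Int).foldl (fun out oz =>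
              if |ox| = 2 ∧ |oz| = 2 then out
              else if ox = 0 ∧ oz = 0 then out
              else out ++ [((x + ox, g + 4, z + oz), "leaves")]) out))
    (init := pvWOODS) (l := ([-2,-1,0,1,2] : List Int)) ?_
  intro acc ox
  have i1 : ∀ acc2 : List ((Int × Int × Int) × String),
      List.foldl (fun out oz =>
        if |ox| = 2 ∧ |oz| = 2 then out
        else if ox = 0 ∧ oz = 0 then out
        else out ++ [((x + ox, g + 4, z + oz), "leaves")])
        (acc2.map (pvShP x g z)) ([-2,-1,0,1,2] : List Int) =
      (List.foldl (fun out oz =>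
        if |ox| = 2 ∧ |oz| = 2 then out
        else if ox = 0 ∧ oz = 0 then out
        else out ++ [((ox, 4, oz), "leaves")]) acc2 ([-2,-1,0,1,2] : List Int)).map
        (pvShP x g z) := by
    intro acc2
    refine List.foldl_hom (List.map (pvShP x g z))
      (g₁ := fun out oz =>
        if |ox| = 2 ∧ |oz| = 2 then out
        else if ox = 0 ∧ oz = 0 then out
        else out ++ [((ox, 4, oz), "leaves")])
      (g₂ := fun out oz =>
        if |ox| = 2 ∧ |oz| = 2 then out
        else if ox = 0 ∧ oz = 0 then out
        else out ++ [((x + ox, g + 4, z + oz), "leaves")])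
      (init := acc2) (l := ([-2,-1,0,1,2] : List Int)) ?_
    intro a oz
    by_cases hc : |ox| = 2 ∧ |oz| = 2
    · simp only [if_pos hc]
    · simp only [if_neg hc]
      by_cases h0 : ox = 0 ∧ oz = 0
      · simp only [if_pos h0]
      · simp only [if_neg h0]
        simp [pvShP, pvSh]
  have i2 : ∀ acc2 : List ((Int × Int × Int) × String),
      List.foldl (fun out oz => out ++ [((x + ox, g + 5, z + oz), "leaves")])
        (acc2.map (pvShP x g z)) ([-1,0,1] : List Int) =
      (List.foldl (fun out oz => out ++ [((ox, 5, oz), "leaves")]) acc2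
        ([-1,0,1] : List Int)).map (pvShP x g z) := by
    intro acc2
    refine List.foldl_hom (List.map (pvShP x g z))
      (g₁ := fun out oz => out ++ [((ox, 5, oz), "leaves")])
      (g₂ := fun out oz => out ++ [((x + ox, g + 5, z + oz), "leaves")])
      (init := acc2) (l := ([-1,0,1] : List Int)) ?_
    intro a oz
    simp [pvShP, pvSh]
  by_cases h0 : ox = 0
  · simp only [if_pos h0]
    have hb : -1 ≤ ox ∧ ox ≤ 1 := by omega
    simp only [if_pos hb, i1, i2]
    simp [pvShP, pvSh]
  · simp only [if_neg h0]
    by_cases hb : -1 ≤ ox ∧ ox ≤ 1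
    · simp only [if_pos hb, i1, i2]
    · simp only [if_neg hb, i1]

theorem tree_placements_py_spec : Claim_equal_tree_placements_py := by
  intro x g z _
  show tree_placements_py x g z = tree_placements_py_alt x g z
  rw [pvA_eq, pvB_eq, pvAOFF_eq_pvOUT, pvBOFF_eq_pvOUT]
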